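-- pv_equiv track=rewrite | github.com/onegod7898-bot/levels-website | scripts/build_pages.py | subpage_link_fixes
-- ===== SOURCE A (Python) =====
-- def subpage_link_fixes(html: str) -> str:
--     """Point hash links to real pages."""
--     repl = [
--         ('href="#booking"', 'href="book.html"'),
--         ('href="#services"', 'href="services.html"'),
--         ('href="#how-it-works"', 'href="how-it-works.html"'),
--         ('href="#booth"', 'href="360-videobooth.html"'),
--         ('href="#package"', 'href="package.html"'),
--         ('href="#gallery"', 'href="gallery.html"'),
--         ('href="#instagram"', 'href="instagram.html"'),
--         ('href="#why"', 'href="why.html"'),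
--         ('href="#testimonials"', 'href="why.html#testimonials"'),
--     ]
--     for a, b in repl:
--         html = html.replace(a, b)
--     return html
-- ===== SOURCE B (Python) =====
-- PAGES = {
--     'booking': 'book.html',
--     'services': 'services.html',
--     'how-it-works': 'how-it-works.html',
--     'booth': '360-videobooth.html',
--     'package': 'package.html',
--     'gallery': 'gallery.html',
--     'instagram': 'instagram.html',
--     'why': 'why.html',
--     'testimonials': 'why.html#testimonials',
-- }
--
--
-- def subpage_link_fixes(html: str) -> str:
--     """Point hash links to real pages: one table-driven left-to-right scan."""
--     table = [('href="#' + name + '"', 'href="' + page + '"') for name, page in PAGES.items()]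
--     out = []
--     i = 0
--     n = len(html)
--     while i < n:
--         for a, b in table:
--             if html.startswith(a, i):
--                 out.append(b)
--                 i += len(a)
--                 break
--         else:
--             out.append(html[i])
--             i += 1
--     return ''.join(out)
-- ===== Notes on version B (the rewrite author's own statement) =====
-- stated objective: alternative
-- what changed: Replaces A's nine sequential full-string str.replace passes with a single left-to-right table-driven scan that substitutes each anchor in place as it is encountered.
import Mathlib
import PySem

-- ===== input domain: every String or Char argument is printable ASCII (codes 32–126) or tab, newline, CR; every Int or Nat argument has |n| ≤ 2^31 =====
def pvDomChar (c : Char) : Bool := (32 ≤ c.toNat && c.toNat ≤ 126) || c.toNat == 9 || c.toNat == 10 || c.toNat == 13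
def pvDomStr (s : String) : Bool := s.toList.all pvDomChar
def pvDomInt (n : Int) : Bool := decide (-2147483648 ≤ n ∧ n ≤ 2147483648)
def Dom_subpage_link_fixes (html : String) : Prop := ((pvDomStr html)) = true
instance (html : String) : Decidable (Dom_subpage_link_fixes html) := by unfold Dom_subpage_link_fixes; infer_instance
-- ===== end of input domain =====

-- B replaces A's nine sequential full-string `.replace` passes by one table-driven
-- left-to-right scan that substitutes each anchor the moment it is seen.

-- ===== PORT A =====
def pvRepl : List (String × String) := [
  ("href=\"#booking\"", "href=\"book.html\""),
  ("href=\"#services\"", "href=\"services.html\""),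
  ("href=\"#how-it-works\"", "href=\"how-it-works.html\""),
  ("href=\"#booth\"", "href=\"360-videobooth.html\""),
  ("href=\"#package\"", "href=\"package.html\""),
  ("href=\"#gallery\"", "href=\"gallery.html\""),
  ("href=\"#instagram\"", "href=\"instagram.html\""),
  ("href=\"#why\"", "href=\"why.html\""),
  ("href=\"#testimonials\"", "href=\"why.html#testimonials\"")]

def subpage_link_fixes (html : String) : String :=
  pvRepl.foldl (fun h p => PySem.Str.replace h p.1 p.2) html

-- ===== PORT B =====
def pvPages : List (String × String) := [
  ("booking", "book.html"),
  ("services", "services.html"),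
  ("how-it-works", "how-it-works.html"),
  ("booth", "360-videobooth.html"),
  ("package", "package.html"),
  ("gallery", "gallery.html"),
  ("instagram", "instagram.html"),
  ("why", "why.html"),
  ("testimonials", "why.html#testimonials")]

-- Source B's table comprehension: wrap each page name into its full anchor string
def pvTable : List (String × String) :=
  pvPages.map (fun p => ("href=\"#" ++ p.1 ++ "\"", "href=\"" ++ p.2 ++ "\""))

-- every key of the table is nonempty (cited by the scan's termination proof)
theorem pvTable_key_pos : ∀ p ∈ pvTable, 0 < p.1.toList.length := by decide

-- the while-loop of Source B: at each position try the table keys in order, else copy one char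
def pvScanGo : List Char → List Char
  | [] => []
  | c :: t =>
    match h : pvTable.find? (fun p => p.1.toList.isPrefixOf (c :: t)) with
    | some (a, b) => b.toList ++ pvScanGo ((c :: t).drop a.toList.length)
    | none => c :: pvScanGo t
termination_by s => s.length
decreasing_by
  · have hm := List.mem_of_find?_eq_some h
    have hlen : 0 < a.toList.length := pvTable_key_pos (a, b) hm
    simp only [List.length_drop, List.length_cons]
    omega
  · simp

def subpage_link_fixes_alt (html : String) : String :=
  String.ofList (pvScanGo html.toList)

-- ===== PRECONDITION & SPEC =====
def Spec_subpage_link_fixes (html : String) (out : String) : Prop := out = subpage_link_fixes_alt html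
instance (html : String) (out : String) : Decidable (Spec_subpage_link_fixes html out) := by unfold Spec_subpage_link_fixes; infer_instance

-- ===== CLAIM (what is proved, stated in full; the proofs are below) =====
def Claim_equal_subpage_link_fixes : Prop := ∀ (html : String), Dom_subpage_link_fixes html → Spec_subpage_link_fixes html (subpage_link_fixes html)

-- ===== LEMMAS AND PROOFS =====

-- two char lists are "compatible" when one is a prefix of the other (they can match at the same spot)
def pvCompat (a b : List Char) : Bool := a.isPrefixOf b || b.isPrefixOf a

-- proof-side mirror of Python's left-to-right non-overlapping str.replace (for a nonempty pattern)
def pvReplaceL (old new : List Char) : List Char → List Char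
  | [] => []
  | c :: t =>
    if h : (old.isPrefixOf (c :: t) && !old.isEmpty) = true
    then new ++ pvReplaceL old new ((c :: t).drop old.length)
    else c :: pvReplaceL old new t
termination_by s => s.length
decreasing_by
  · simp only [Bool.and_eq_true, Bool.not_eq_true', List.isEmpty_eq_false_iff] at h
    have : 0 < old.length := List.length_pos_of_ne_nil h.2
    simp only [List.length_drop, List.length_cons]
    omega
  · simp

-- generic multi-key single-pass scanner (pvScanGo is its instance at the concrete table)
def pvScan (ps : List (List Char × List Char)) : List Char → List Char
  | [] => []
  | c :: t =>
    match h : ps.find? (fun p => p.1.isPrefixOf (c :: t) && !p.1.isEmpty) with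
    | some (k, v) => v ++ pvScan ps ((c :: t).drop k.length)
    | none => c :: pvScan ps t
termination_by s => s.length
decreasing_by
  · have := List.find?_some h
    simp only [Bool.and_eq_true, Bool.not_eq_true', List.isEmpty_eq_false_iff] at this
    have : 0 < k.length := List.length_pos_of_ne_nil this.2
    simp only [List.length_drop, List.length_cons]
    omega
  · simp

theorem pvFind?_congr {α : Type} (l : List α) (f g : α → Bool)
    (h : ∀ a ∈ l, f a = g a) : l.find? f = l.find? g := by
  induction l with
  | nil => rfl
  | cons a t ih =>
    have ha : f a = g a := h a (List.mem_cons_self ..)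
    cases hf : f a with
    | true =>
      rw [List.find?_cons_of_pos hf, List.find?_cons_of_pos (by rw [← ha]; exact hf)]
    | false =>
      rw [List.find?_cons_of_neg (by simp [hf]), List.find?_cons_of_neg (by simp [← ha, hf])]
      exact ih (fun x hx => h x (List.mem_cons_of_mem _ hx))

theorem pvScan_nil' (ps : List (List Char × List Char)) : pvScan ps [] = [] := by
  simp [pvScan]

theorem pvScan_cons_some {ps : List (List Char × List Char)} {c : Char} {t k v : List Char}
    (h : ps.find? (fun p => p.1.isPrefixOf (c :: t) && !p.1.isEmpty) = some (k, v)) :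
    pvScan ps (c :: t) = v ++ pvScan ps ((c :: t).drop k.length) := by
  rw [pvScan.eq_def]
  split
  · rename_i heq
    cases heq
  · rename_i heq
    cases heq
    split
    · rename_i heq2
      rw [h] at heq2
      cases heq2
      rfl
    · rename_i heq2
      rw [h] at heq2
      cases heq2

theorem pvScan_cons_none {ps : List (List Char × List Char)} {c : Char} {t : List Char}
    (h : ps.find? (fun p => p.1.isPrefixOf (c :: t) && !p.1.isEmpty) = none) :
    pvScan ps (c :: t) = c :: pvScan ps t := by
  rw [pvScan.eq_def]
  split
  · rename_i heq
    cases heq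
  · rename_i heq
    cases heq
    split
    · rename_i heq2
      rw [h] at heq2
      cases heq2
    · rfl

theorem pvScan_nil (s : List Char) : pvScan [] s = s := by
  induction s with
  | nil => exact pvScan_nil' []
  | cons c t ih => rw [pvScan_cons_none rfl, ih]

theorem pvReplaceL_nil (k v : List Char) : pvReplaceL k v [] = [] := by
  simp [pvReplaceL]

theorem pvReplaceL_cons_pos {k v : List Char} {c : Char} {t : List Char}
    (h : (k.isPrefixOf (c :: t) && !k.isEmpty) = true) :
    pvReplaceL k v (c :: t) = v ++ pvReplaceL k v ((c :: t).drop k.length) := by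
  rw [pvReplaceL.eq_def]
  simp [h]

theorem pvReplaceL_cons_neg {k v : List Char} {c : Char} {t : List Char}
    (h : (k.isPrefixOf (c :: t) && !k.isEmpty) = false) :
    pvReplaceL k v (c :: t) = c :: pvReplaceL k v t := by
  rw [pvReplaceL.eq_def]
  simp [h]

theorem replace_go_eq (old new : List Char) (h : old ≠ []) :
    ∀ fuel l acc, l.length ≤ fuel →
      PySem.Chars.replace.go old new fuel l acc = acc.reverse ++ pvReplaceL old new l := by
  intro fuel
  induction fuel with
  | zero =>
    intro l acc hl
    cases l with
    | nil => simp [PySem.Chars.replace.go, pvReplaceL_nil]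
    | cons c t => simp at hl
  | succ n ih =>
    intro l acc hl
    cases l with
    | nil => simp [PySem.Chars.replace.go, pvReplaceL_nil]
    | cons c t =>
      by_cases hp : old.isPrefixOf (c :: t) = true
      · have hcond : (old.isPrefixOf (c :: t) && !old.isEmpty) = true := by
          simp [hp, List.isEmpty_eq_false_iff, h]
        have hol : 0 < old.length := List.length_pos_of_ne_nil h
        have hdl : ((c :: t).drop old.length).length ≤ n := by
          simp only [List.length_drop, List.length_cons]
          simp only [List.length_cons] at hl
          omega
        rw [pvReplaceL_cons_pos hcond]
        simp only [PySem.Chars.replace.go]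
        rw [if_pos hp, ih _ _ hdl]
        simp [List.reverse_append]
      · have hp' : old.isPrefixOf (c :: t) = false := by
          revert hp; cases old.isPrefixOf (c :: t) <;> simp
        have hcond : (old.isPrefixOf (c :: t) && !old.isEmpty) = false := by simp [hp']
        rw [pvReplaceL_cons_neg hcond]
        simp only [PySem.Chars.replace.go]
        rw [if_neg hp, ih _ _ (by simp only [List.length_cons] at hl; omega)]
        simp

theorem replace_eq (old new s : List Char) (h : old ≠ []) :
    PySem.Chars.replace s old new = pvReplaceL old new s := by
  have hE : old.isEmpty = false := by simp [List.isEmpty_eq_false_iff, h]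
  simp only [PySem.Chars.replace, hE]
  rw [replace_go_eq old new h s.length s [] le_rfl]
  simp

theorem pvReplaceL_copy (k v : List Char) :
    ∀ n s, n ≤ s.length → (∀ i < n, k.isPrefixOf (s.drop i) = false) →
      pvReplaceL k v s = s.take n ++ pvReplaceL k v (s.drop n) := by
  intro n
  induction n with
  | zero => intro s _ _; simp
  | succ n ih =>
    intro s hn hno
    cases s with
    | nil => simp at hn
    | cons c t =>
      have h0 : k.isPrefixOf (c :: t) = false := by
        have := hno 0 (Nat.succ_pos n)
        rwa [List.drop_zero] at this
      have hcond : (k.isPrefixOf (c :: t) && !k.isEmpty) = false := by simp [h0]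
      rw [pvReplaceL_cons_neg hcond]
      rw [ih t (by simp only [List.length_cons] at hn; omega)
        (fun i hi => by
          have := hno (i + 1) (by omega)
          rwa [List.drop_succ_cons] at this)]
      simp [List.take_succ_cons, List.drop_succ_cons]

theorem prefix_replaceL (k v k' : List Char)
    (hC : ∀ j < k'.length, pvCompat (k'.drop j) v = false) :
    ∀ s j, (k'.drop j) <+: pvReplaceL k v s → (k'.drop j) <+: s := by
  intro s
  induction s with
  | nil =>
    intro j hp
    rw [pvReplaceL_nil, List.prefix_nil] at hp
    simp [hp]
  | cons c t ih =>
    intro j hp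
    by_cases hj : j < k'.length
    · cases hcond : (k.isPrefixOf (c :: t) && !k.isEmpty) with
      | true =>
        rw [pvReplaceL_cons_pos hcond] at hp
        exfalso
        have hv := List.prefix_or_prefix_of_prefix hp (List.prefix_append v _)
        have hcj := hC j hj
        simp only [pvCompat, Bool.or_eq_false_iff] at hcj
        rw [← Bool.not_eq_true, ← Bool.not_eq_true, List.isPrefixOf_iff_prefix,
          List.isPrefixOf_iff_prefix] at hcj
        rcases hv with hv | hv
        · exact hcj.1 hv
        · exact hcj.2 hv
      | false =>
        rw [pvReplaceL_cons_neg hcond] at hp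
        rw [← List.getElem_cons_drop hj] at hp ⊢
        rw [List.cons_prefix_cons] at hp ⊢
        exact ⟨hp.1, ih (j + 1) hp.2⟩
    · rw [List.drop_eq_nil_of_le (Nat.le_of_not_lt hj)]
      exact List.nil_prefix

theorem pvScan_inert (K : List (List Char × List Char)) (v : List Char)
    (hV : ∀ i < v.length, ∀ p ∈ K, pvCompat (v.drop i) p.1 = false) :
    ∀ x, pvScan K (v ++ x) = v ++ pvScan K x := by
  suffices H : ∀ (w x : List Char),
      (∀ i < w.length, ∀ p ∈ K, pvCompat (w.drop i) p.1 = false) →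
      pvScan K (w ++ x) = w ++ pvScan K x from fun x => H v x hV
  intro w
  induction w with
  | nil => intro x _; simp
  | cons c u ih =>
    intro x hw
    have hfind : K.find? (fun p => p.1.isPrefixOf (c :: (u ++ x)) && !p.1.isEmpty) = none := by
      rw [List.find?_eq_none]
      intro p hp hpred
      simp only [Bool.and_eq_true, Bool.not_eq_true', List.isEmpty_eq_false_iff] at hpred
      obtain ⟨hpre, _⟩ := hpred
      rw [List.isPrefixOf_iff_prefix] at hpre
      rw [← List.cons_append] at hpre
      have h2 := List.prefix_or_prefix_of_prefix hpre (List.prefix_append (c :: u) x)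
      have h3 := hw 0 (by simp) p hp
      rw [List.drop_zero] at h3
      simp only [pvCompat, Bool.or_eq_false_iff] at h3
      rw [← Bool.not_eq_true, ← Bool.not_eq_true, List.isPrefixOf_iff_prefix,
        List.isPrefixOf_iff_prefix] at h3
      rcases h2 with h2 | h2
      · exact h3.2 h2
      · exact h3.1 h2
    rw [List.cons_append, pvScan_cons_none hfind]
    rw [ih x (fun i hi p hp => by
      have := hw (i + 1) (by simp only [List.length_cons]; omega) p hp
      rwa [List.drop_succ_cons] at this)]
    rfl

theorem pvCore (k v : List Char) (K : List (List Char × List Char)) (h0 : k ≠ [])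
    (hC : ∀ p ∈ K, ∀ j < p.1.length, pvCompat (p.1.drop j) v = false)
    (hK : ∀ p ∈ K, ∀ j, 1 ≤ j → j < p.1.length → pvCompat (p.1.drop j) k = false)
    (hV : ∀ i < v.length, ∀ p ∈ K, pvCompat (v.drop i) p.1 = false) :
    ∀ s, pvScan K (pvReplaceL k v s) = pvScan ((k, v) :: K) s := by
  suffices H : ∀ n s, s.length ≤ n → pvScan K (pvReplaceL k v s) = pvScan ((k, v) :: K) s from
    fun s => H s.length s le_rfl
  intro n
  induction n with
  | zero =>
    intro s hs
    cases s with
    | nil => rw [pvReplaceL_nil, pvScan_nil', pvScan_nil']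
    | cons c t => simp at hs
  | succ n ih =>
    intro s hs
    cases s with
    | nil => rw [pvReplaceL_nil, pvScan_nil', pvScan_nil']
    | cons c t =>
      have hke : k.isEmpty = false := by simp [List.isEmpty_eq_false_iff, h0]
      by_cases hm : k.isPrefixOf (c :: t) = true
      · have hcond : (k.isPrefixOf (c :: t) && !k.isEmpty) = true := by simp [hm, hke]
        have hkl : 0 < k.length := List.length_pos_of_ne_nil h0
        rw [pvReplaceL_cons_pos hcond]
        rw [pvScan_inert K v hV]
        rw [ih _ (by
          simp only [List.length_drop, List.length_cons]
          simp only [List.length_cons] at hs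
          omega)]
        rw [pvScan_cons_some (List.find?_cons_of_pos hcond)]
      · have hm' : k.isPrefixOf (c :: t) = false := by
          revert hm; cases k.isPrefixOf (c :: t) <;> simp
        have hcond : (k.isPrefixOf (c :: t) && !k.isEmpty) = false := by simp [hm']
        have hfcons : List.find? (fun p : List Char × List Char =>
              p.1.isPrefixOf (c :: t) && !p.1.isEmpty) ((k, v) :: K)
            = List.find? (fun p => p.1.isPrefixOf (c :: t) && !p.1.isEmpty) K :=
          List.find?_cons_of_neg (by simp [hm'])
        rw [pvReplaceL_cons_neg hcond]
        -- the predicate agrees on s and on the partially-replaced string, key by key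
        have hpt : ∀ p ∈ K, (p.1.isPrefixOf (c :: pvReplaceL k v t) && !p.1.isEmpty)
            = (p.1.isPrefixOf (c :: t) && !p.1.isEmpty) := by
          intro p hp
          have hmod : c :: pvReplaceL k v t = pvReplaceL k v (c :: t) :=
            (pvReplaceL_cons_neg hcond).symm
          rw [hmod]
          congr 1
          by_cases hps : p.1.isPrefixOf (c :: t) = true
          · rw [hps]
            have hpre := List.isPrefixOf_iff_prefix.mp hps
            have hlen : p.1.length ≤ (c :: t).length := hpre.length_le
            have hnomatch : ∀ i < p.1.length, k.isPrefixOf ((c :: t).drop i) = false := by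
              intro i hi
              cases i with
              | zero => rwa [List.drop_zero]
              | succ m =>
                by_contra hcontra
                have hk2 : k <+: (c :: t).drop (m + 1) := by
                  rw [← List.isPrefixOf_iff_prefix]
                  revert hcontra; cases k.isPrefixOf ((c :: t).drop (m + 1)) <;> simp
                have hp2 : p.1.drop (m + 1) <+: (c :: t).drop (m + 1) := hpre.drop (m + 1)
                have hor := List.prefix_or_prefix_of_prefix hp2 hk2
                have hKp := hK p hp (m + 1) (by omega) hi
                simp only [pvCompat, Bool.or_eq_false_iff] at hKp
                rw [← Bool.not_eq_true, ← Bool.not_eq_true, List.isPrefixOf_iff_prefix,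
                  List.isPrefixOf_iff_prefix] at hKp
                rcases hor with hor | hor
                · exact hKp.1 hor
                · exact hKp.2 hor
            rw [pvReplaceL_copy k v p.1.length (c :: t) hlen hnomatch]
            rw [List.isPrefixOf_iff_prefix]
            have htake : p.1 = (c :: t).take p.1.length := List.prefix_iff_eq_take.mp hpre
            rw [← htake]
            exact List.prefix_append _ _
          · have hps' : p.1.isPrefixOf (c :: t) = false := by
              revert hps; cases p.1.isPrefixOf (c :: t) <;> simp
            rw [hps']
            by_contra hcontra
            have hmodpre : p.1.isPrefixOf (pvReplaceL k v (c :: t)) = true := by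
              revert hcontra; cases p.1.isPrefixOf (pvReplaceL k v (c :: t)) <;> simp
            have hpre2 := List.isPrefixOf_iff_prefix.mp hmodpre
            have hdz : p.1.drop 0 <+: pvReplaceL k v (c :: t) := by rwa [List.drop_zero]
            have := prefix_replaceL k v p.1 (hC p hp) (c :: t) 0 hdz
            rw [List.drop_zero] at this
            rw [← List.isPrefixOf_iff_prefix] at this
            rw [hps'] at this
            cases this
        have hfeq : K.find? (fun p => p.1.isPrefixOf (c :: pvReplaceL k v t) && !p.1.isEmpty)
            = K.find? (fun p => p.1.isPrefixOf (c :: t) && !p.1.isEmpty) :=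
          pvFind?_congr _ _ _ hpt
        cases hf : K.find? (fun p => p.1.isPrefixOf (c :: t) && !p.1.isEmpty) with
        | none =>
          rw [pvScan_cons_none (hfeq.trans hf)]
          rw [ih t (by simp only [List.length_cons] at hs; omega)]
          rw [pvScan_cons_none (hfcons.trans hf)]
        | some kv =>
          obtain ⟨k', v'⟩ := kv
          have hmem := List.mem_of_find?_eq_some hf
          have hpred := List.find?_some hf
          simp only [Bool.and_eq_true, Bool.not_eq_true', List.isEmpty_eq_false_iff] at hpred
          obtain ⟨hk'pre, hk'ne⟩ := hpred
          have hk'p : k' <+: (c :: t) := List.isPrefixOf_iff_prefix.mp hk'pre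
          have hk'len : k'.length ≤ (c :: t).length := hk'p.length_le
          have hk'pos : 0 < k'.length := List.length_pos_of_ne_nil hk'ne
          have hnomatch : ∀ i < k'.length, k.isPrefixOf ((c :: t).drop i) = false := by
            intro i hi
            cases i with
            | zero => rwa [List.drop_zero]
            | succ m =>
              by_contra hcontra
              have hk2 : k <+: (c :: t).drop (m + 1) := by
                rw [← List.isPrefixOf_iff_prefix]
                revert hcontra; cases k.isPrefixOf ((c :: t).drop (m + 1)) <;> simp
              have hp2 : k'.drop (m + 1) <+: (c :: t).drop (m + 1) := hk'p.drop (m + 1)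
              have hor := List.prefix_or_prefix_of_prefix hp2 hk2
              have hKp := hK (k', v') hmem (m + 1) (by omega) hi
              simp only [pvCompat, Bool.or_eq_false_iff] at hKp
              rw [← Bool.not_eq_true, ← Bool.not_eq_true, List.isPrefixOf_iff_prefix,
                List.isPrefixOf_iff_prefix] at hKp
              rcases hor with hor | hor
              · exact hKp.1 hor
              · exact hKp.2 hor
          rw [pvScan_cons_some (hfeq.trans hf)]
          have hmod : c :: pvReplaceL k v t = pvReplaceL k v (c :: t) :=
            (pvReplaceL_cons_neg hcond).symm
          rw [hmod, pvReplaceL_copy k v k'.length (c :: t) hk'len hnomatch,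
            List.drop_left' (by rw [List.length_take]; exact Nat.min_eq_left hk'len)]
          rw [ih ((c :: t).drop k'.length) (by
            simp only [List.length_drop, List.length_cons]
            simp only [List.length_cons] at hs
            omega)]
          rw [pvScan_cons_some (hfcons.trans hf)]

theorem pvScanGo_nil : pvScanGo [] = [] := by
  simp [pvScanGo]

theorem pvScanGo_cons_some {c : Char} {t : List Char} {a b : String}
    (h : pvTable.find? (fun p => p.1.toList.isPrefixOf (c :: t)) = some (a, b)) :
    pvScanGo (c :: t) = b.toList ++ pvScanGo ((c :: t).drop a.toList.length) := by
  rw [pvScanGo.eq_def]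
  split
  · rename_i heq
    cases heq
  · rename_i heq
    cases heq
    split
    · rename_i heq2
      rw [h] at heq2
      cases heq2
      rfl
    · rename_i heq2
      rw [h] at heq2
      cases heq2

theorem pvScanGo_cons_none {c : Char} {t : List Char}
    (h : pvTable.find? (fun p => p.1.toList.isPrefixOf (c :: t)) = none) :
    pvScanGo (c :: t) = c :: pvScanGo t := by
  rw [pvScanGo.eq_def]
  split
  · rename_i heq
    cases heq
  · rename_i heq
    cases heq
    split
    · rename_i heq2
      rw [h] at heq2
      cases heq2
    · rfl

theorem pvScanGo_eq (s : List Char) :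
    pvScanGo s = pvScan (pvTable.map (fun p => (p.1.toList, p.2.toList))) s := by
  suffices H : ∀ n s, s.length ≤ n →
      pvScanGo s = pvScan (pvTable.map (fun p => (p.1.toList, p.2.toList))) s from
    H s.length s le_rfl
  intro n
  induction n with
  | zero =>
    intro s hs
    cases s with
    | nil => rw [pvScanGo_nil, pvScan_nil']
    | cons c t => simp at hs
  | succ n ih =>
    intro s hs
    cases s with
    | nil => rw [pvScanGo_nil, pvScan_nil']
    | cons c t =>
      have hcomp : (pvTable.map (fun p => (p.1.toList, p.2.toList))).find?
            (fun p => p.1.isPrefixOf (c :: t) && !p.1.isEmpty)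
          = (pvTable.find? (fun p => p.1.toList.isPrefixOf (c :: t))).map
            (fun p => (p.1.toList, p.2.toList)) := by
        rw [List.find?_map]
        congr 1
        apply pvFind?_congr
        intro p hp
        have hpos := pvTable_key_pos p hp
        have hne : p.1.toList.isEmpty = false := by
          rw [List.isEmpty_eq_false_iff]
          intro hnil
          rw [hnil] at hpos
          simp at hpos
        simp [Function.comp, hne]
      cases hf : pvTable.find? (fun p => p.1.toList.isPrefixOf (c :: t)) with
      | none =>
        rw [pvScanGo_cons_none hf, pvScan_cons_none (by rw [hcomp, hf]; rfl)]
        rw [ih t (by simp only [List.length_cons] at hs; omega)]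
      | some p =>
        obtain ⟨a, b⟩ := p
        have hmem := List.mem_of_find?_eq_some hf
        have hal : 0 < a.toList.length := pvTable_key_pos (a, b) hmem
        rw [pvScanGo_cons_some hf,
          pvScan_cons_some (k := a.toList) (v := b.toList) (by rw [hcomp, hf]; rfl)]
        rw [ih ((c :: t).drop a.toList.length) (by
          simp only [List.length_drop, List.length_cons]
          simp only [List.length_cons] at hs
          omega)]

theorem foldA : ∀ (ps : List (String × String)), (∀ p ∈ ps, p.1.toList ≠ []) →
    ∀ s : String, (ps.foldl (fun h p => PySem.Str.replace h p.1 p.2) s).toList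
      = (ps.map (fun p => (p.1.toList, p.2.toList))).foldl (fun t q => pvReplaceL q.1 q.2 t) s.toList := by
  intro ps
  induction ps with
  | nil => intro _ s; simp
  | cons p rest ih =>
    intro hne s
    simp only [List.foldl_cons, List.map_cons]
    rw [ih (fun q hq => hne q (List.mem_cons_of_mem _ hq)) (PySem.Str.replace s p.1 p.2)]
    congr 1
    rw [PySem.Str.toList_replace]
    exact replace_eq p.1.toList p.2.toList s.toList (hne p (List.mem_cons_self ..))

theorem scan_chain (s : List Char) :
    (pvRepl.map (fun p => (p.1.toList, p.2.toList))).foldl (fun t q => pvReplaceL q.1 q.2 t) s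
      = pvScan (pvTable.map (fun p => (p.1.toList, p.2.toList))) s := by
  simp only [pvRepl, List.map_cons, List.map_nil, List.foldl_cons, List.foldl_nil]
  rw [show pvTable.map (fun p => (p.1.toList, p.2.toList)) =
    [("href=\"#booking\"".toList, "href=\"book.html\"".toList),
     ("href=\"#services\"".toList, "href=\"services.html\"".toList),
     ("href=\"#how-it-works\"".toList, "href=\"how-it-works.html\"".toList),
     ("href=\"#booth\"".toList, "href=\"360-videobooth.html\"".toList),
     ("href=\"#package\"".toList, "href=\"package.html\"".toList),
     ("href=\"#gallery\"".toList, "href=\"gallery.html\"".toList),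
     ("href=\"#instagram\"".toList, "href=\"instagram.html\"".toList),
     ("href=\"#why\"".toList, "href=\"why.html\"".toList),
     ("href=\"#testimonials\"".toList, "href=\"why.html#testimonials\"".toList)] from by decide]
  rw [← pvScan_nil (pvReplaceL "href=\"#testimonials\"".toList "href=\"why.html#testimonials\"".toList _)]
  rw [pvCore "href=\"#testimonials\"".toList "href=\"why.html#testimonials\"".toList
    [] (by decide) (by decide) (by decide) (by decide)]
  rw [pvCore "href=\"#why\"".toList "href=\"why.html\"".toList
    [("href=\"#testimonials\"".toList, "href=\"why.html#testimonials\"".toList)]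
    (by decide) (by decide) (by decide) (by decide)]
  rw [pvCore "href=\"#instagram\"".toList "href=\"instagram.html\"".toList
    [("href=\"#why\"".toList, "href=\"why.html\"".toList),
     ("href=\"#testimonials\"".toList, "href=\"why.html#testimonials\"".toList)]
    (by decide) (by decide) (by decide) (by decide)]
  rw [pvCore "href=\"#gallery\"".toList "href=\"gallery.html\"".toList
    [("href=\"#instagram\"".toList, "href=\"instagram.html\"".toList),
     ("href=\"#why\"".toList, "href=\"why.html\"".toList),
     ("href=\"#testimonials\"".toList, "href=\"why.html#testimonials\"".toList)]
    (by decide) (by decide) (by decide) (by decide)]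
  rw [pvCore "href=\"#package\"".toList "href=\"package.html\"".toList
    [("href=\"#gallery\"".toList, "href=\"gallery.html\"".toList),
     ("href=\"#instagram\"".toList, "href=\"instagram.html\"".toList),
     ("href=\"#why\"".toList, "href=\"why.html\"".toList),
     ("href=\"#testimonials\"".toList, "href=\"why.html#testimonials\"".toList)]
    (by decide) (by decide) (by decide) (by decide)]
  rw [pvCore "href=\"#booth\"".toList "href=\"360-videobooth.html\"".toList
    [("href=\"#package\"".toList, "href=\"package.html\"".toList),
     ("href=\"#gallery\"".toList, "href=\"gallery.html\"".toList),
     ("href=\"#instagram\"".toList, "href=\"instagram.html\"".toList),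
     ("href=\"#why\"".toList, "href=\"why.html\"".toList),
     ("href=\"#testimonials\"".toList, "href=\"why.html#testimonials\"".toList)]
    (by decide) (by decide) (by decide) (by decide)]
  rw [pvCore "href=\"#how-it-works\"".toList "href=\"how-it-works.html\"".toList
    [("href=\"#booth\"".toList, "href=\"360-videobooth.html\"".toList),
     ("href=\"#package\"".toList, "href=\"package.html\"".toList),
     ("href=\"#gallery\"".toList, "href=\"gallery.html\"".toList),
     ("href=\"#instagram\"".toList, "href=\"instagram.html\"".toList),
     ("href=\"#why\"".toList, "href=\"why.html\"".toList),
     ("href=\"#testimonials\"".toList, "href=\"why.html#testimonials\"".toList)]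
    (by decide) (by decide) (by decide) (by decide)]
  rw [pvCore "href=\"#services\"".toList "href=\"services.html\"".toList
    [("href=\"#how-it-works\"".toList, "href=\"how-it-works.html\"".toList),
     ("href=\"#booth\"".toList, "href=\"360-videobooth.html\"".toList),
     ("href=\"#package\"".toList, "href=\"package.html\"".toList),
     ("href=\"#gallery\"".toList, "href=\"gallery.html\"".toList),
     ("href=\"#instagram\"".toList, "href=\"instagram.html\"".toList),
     ("href=\"#why\"".toList, "href=\"why.html\"".toList),
     ("href=\"#testimonials\"".toList, "href=\"why.html#testimonials\"".toList)]
    (by decide) (by decide) (by decide) (by decide)]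
  rw [pvCore "href=\"#booking\"".toList "href=\"book.html\"".toList
    [("href=\"#services\"".toList, "href=\"services.html\"".toList),
     ("href=\"#how-it-works\"".toList, "href=\"how-it-works.html\"".toList),
     ("href=\"#booth\"".toList, "href=\"360-videobooth.html\"".toList),
     ("href=\"#package\"".toList, "href=\"package.html\"".toList),
     ("href=\"#gallery\"".toList, "href=\"gallery.html\"".toList),
     ("href=\"#instagram\"".toList, "href=\"instagram.html\"".toList),
     ("href=\"#why\"".toList, "href=\"why.html\"".toList),
     ("href=\"#testimonials\"".toList, "href=\"why.html#testimonials\"".toList)]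
    (by decide) (by decide) (by decide) (by decide)]

-- ===== VERDICT (by name: the statement is the Claim_ definition above) =====
theorem subpage_link_fixes_spec : Claim_equal_subpage_link_fixes := by
  intro html _
  unfold Spec_subpage_link_fixes subpage_link_fixes subpage_link_fixes_alt
  rw [← String.toList_inj, String.toList_ofList, pvScanGo_eq]
  rw [foldA pvRepl (by decide) html]
  exact scan_chain html.toList
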